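-- pv_equiv track=rewrite | github.com/MrBaoDK/funix-csd203x | ex13_82.py | graphFunction
-- ===== SOURCE A (Python) =====
-- def graphFunction(city_count, streets, start, target):
--   adjacency = [[] for _ in range(city_count + 1)]
--   visited = [False] * (city_count + 1)
--   # Build the adjacency list
--   for street in streets:
--     x, y = street
--     if x > city_count or y > city_count:
--       return -1
--     adjacency[x].append(y)
--     adjacency[y].append(x)
--
--   def dfs(city, distance):
--     visited[city] = True
--
--     if city == target:
--       return distance
--
--     for neighbor in adjacency[city]:
--       if not visited[neighbor]:
--         result = dfs(neighbor, distance + 1)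
--         if result != -1:
--           return result
--
--     return -1
--
--   return dfs(start, 1)
-- ===== SOURCE B (Python) =====
-- def graphFunction(city_count, streets, start, target):
--   adjacency = [[] for _ in range(city_count + 1)]
--   visited = [False] * (city_count + 1)
--   # Build the adjacency list (same as A)
--   for street in streets:
--     x, y = street
--     if x > city_count or y > city_count:
--       return -1
--     adjacency[x].append(y)
--     adjacency[y].append(x)
--
--   # Iterative DFS with an explicit stack of (distance, neighbor-iterator)
--   # frames, unrolling A's recursion in the same visiting order.
--   visited[start] = True
--   if start == target:
--     return 1
--   stack = [(1, iter(adjacency[start]))]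
--   while stack:
--     dist, it = stack[-1]
--     n = next(it, None)
--     if n is None:
--       stack.pop()
--     elif not visited[n]:
--       visited[n] = True
--       if n == target:
--         return dist + 1
--       stack.append((dist + 1, iter(adjacency[n])))
--   return -1
-- ===== Notes on version B (the rewrite author's own statement) =====
-- stated objective: alternative
-- what changed: The recursive dfs is replaced by an explicit stack of (distance, neighbor-iterator) frames that unrolls the recursion iteratively (mark/target-check at push time), preserving the exact visiting order and returned distance.
import Mathlib
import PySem

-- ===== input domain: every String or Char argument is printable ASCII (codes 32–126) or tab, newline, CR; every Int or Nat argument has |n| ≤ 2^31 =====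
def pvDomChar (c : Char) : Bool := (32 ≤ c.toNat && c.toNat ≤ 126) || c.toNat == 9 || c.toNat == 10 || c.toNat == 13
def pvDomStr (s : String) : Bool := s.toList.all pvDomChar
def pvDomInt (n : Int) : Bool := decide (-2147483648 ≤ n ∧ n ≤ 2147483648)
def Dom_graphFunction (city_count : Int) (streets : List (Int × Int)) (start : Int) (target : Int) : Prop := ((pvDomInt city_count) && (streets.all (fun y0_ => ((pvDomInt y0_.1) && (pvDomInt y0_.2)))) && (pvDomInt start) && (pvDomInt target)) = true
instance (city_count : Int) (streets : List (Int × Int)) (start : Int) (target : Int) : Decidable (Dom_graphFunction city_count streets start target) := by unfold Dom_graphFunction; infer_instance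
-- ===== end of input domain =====

-- B replaces A's recursive dfs by an explicit stack of (distance, remaining-neighbors)
-- frames that unrolls the recursion iteratively in the same visiting order (alternative
-- decomposition, same asymptotic cost).


-- Python negative-index normalisation for a list of length n (exact for -n ≤ i < n,
-- which Pre_ guarantees for every index actually used).
def pidx (i : Int) (n : Nat) : Nat := (if i < 0 then i + n else i).toNat

-- The adjacency-building loop, identical in A and in B (B keeps it unchanged):
-- returns none for the early `return -1` when a street endpoint exceeds city_count.
def buildAdj (cc : Int) : List (Int × Int) → List (List Int) → Option (List (List Int))
  | [], adj => some adj
  | (x, y) :: rest, adj =>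
    if cc < x ∨ cc < y then none
    else
      let adj1 := adj.set (pidx x adj.length) ((adj.getD (pidx x adj.length) []) ++ [y])
      let adj2 := adj1.set (pidx y adj1.length) ((adj1.getD (pidx y adj1.length) []) ++ [x])
      buildAdj cc rest adj2

-- ===== PORT A =====
-- A's recursive dfs; the Nat argument is a fuel guard that only makes the recursion
-- total (fuel = number of cities + 1 bounds the depth, each call marks a city).
mutual
def dfsA (adj : List (List Int)) (target : Int) : Nat → Int → Int → List Bool → (Int × List Bool)
  | 0, _, _, v => (-1, v)
  | f + 1, city, dist, v =>
    let v1 := v.set (pidx city v.length) true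
    if city == target then (dist, v1)
    else loopA adj target f (adj.getD (pidx city adj.length) []) dist v1
termination_by f _ _ _ => (f, 0)

def loopA (adj : List (List Int)) (target : Int) : Nat → List Int → Int → List Bool → (Int × List Bool)
  | _, [], _, v => (-1, v)
  | f, n :: ns, d, v =>
    if v.getD (pidx n v.length) true then loopA adj target f ns d v
    else
      match dfsA adj target f n (d + 1) v with
      | (r, v') => if r ≠ -1 then (r, v') else loopA adj target f ns d v'
termination_by f ns _ _ => (f, ns.length + 1)
end

def graphFunction (city_count : Int) (streets : List (Int × Int)) (start : Int) (target : Int) : Int :=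
  let N := (city_count + 1).toNat
  match buildAdj city_count streets (List.replicate N []) with
  | none => -1
  | some adj => (dfsA adj target (N + 1) start 1 (List.replicate N false)).1

-- ===== PORT B =====
-- B's explicit-stack DFS: a frame is (distance, remaining neighbors); cities are
-- marked and target-checked when their frame is pushed.  Total by well-founded
-- recursion on (unvisited count, total remaining neighbors).
-- Facts about `count false` under `set`, cited by runB's termination proof.
theorem pvCountSetTrue (v : List Bool) (i : Nat) (h : v.getD i true = false) :
    (v.set i true).count false + 1 = v.count false := by
  induction v generalizing i with
  | nil => simp [List.getD] at h
  | cons a t ih =>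
    cases i with
    | zero =>
      simp [List.getD] at h
      simp [h]
    | succ j =>
      simp [List.getD] at h
      have := ih j (by simpa [List.getD] using h)
      simp [List.count_cons]
      omega

theorem pvCountSetLt (v : List Bool) (i : Nat) (h : v.getD i true = false) :
    (v.set i true).count false < v.count false := by
  have := pvCountSetTrue v i h
  omega

def runB (adj : List (List Int)) (target : Int) : List (Int × List Int) → List Bool → Int
  | [], _ => -1
  | (d, ns) :: st, v =>
    match ns with
    | [] => runB adj target st v
    | n :: rest =>
      if h : v.getD (pidx n v.length) true then runB adj target ((d, rest) :: st) v
      else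
        let v' := v.set (pidx n v.length) true
        if n == target then d + 1
        else runB adj target ((d + 1, adj.getD (pidx n adj.length) []) :: (d, rest) :: st) v'
termination_by st v => (v.count false, (st.map (fun p => p.2.length + 1)).sum)
decreasing_by
  · apply Prod.Lex.right; simp
  · apply Prod.Lex.right; simp
  · apply Prod.Lex.left
    exact pvCountSetLt v (pidx n v.length) (by simpa using h)

def graphFunction_alt (city_count : Int) (streets : List (Int × Int)) (start : Int) (target : Int) : Int :=
  let N := (city_count + 1).toNat
  match buildAdj city_count streets (List.replicate N []) with
  | none => -1
  | some adj =>
    let v0 := List.replicate N false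
    let v1 := v0.set (pidx start v0.length) true
    if start == target then 1
    else runB adj target [(1, adj.getD (pidx start adj.length) [])] v1

-- ===== PRECONDITION & SPEC =====
-- Pre_ admits exactly the inputs on which A returns normally: every street endpoint
-- scanned before the early `return -1` is in Python index range for the adjacency list,
-- and (when no early return happens) start is in index range; A raises IndexError outside.
def Pre_graphFunction (city_count : Int) (streets : List (Int × Int)) (start : Int) (target : Int) : Prop :=
  (∀ s ∈ streets.takeWhile (fun s => decide (s.1 ≤ city_count ∧ s.2 ≤ city_count)),
      -(city_count + 1) ≤ s.1 ∧ -(city_count + 1) ≤ s.2) ∧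
  ((∀ s ∈ streets, s.1 ≤ city_count ∧ s.2 ≤ city_count) →
      -(city_count + 1) ≤ start ∧ start ≤ city_count)

instance (city_count : Int) (streets : List (Int × Int)) (start : Int) (target : Int) : Decidable (Pre_graphFunction city_count streets start target) := by unfold Pre_graphFunction; infer_instance

def pvWitness_graphFunction : Int × (List (Int × Int)) × Int × Int := (2, [(0, 1), (1, 2)], 0, 2)

def Spec_graphFunction (city_count : Int) (streets : List (Int × Int)) (start : Int) (target : Int) (out : Int) : Prop := out = graphFunction_alt city_count streets start target
instance (city_count : Int) (streets : List (Int × Int)) (start : Int) (target : Int) (out : Int) : Decidable (Spec_graphFunction city_count streets start target out) := by unfold Spec_graphFunction; infer_instance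

-- ===== CLAIM (what is proved, stated in full; the proofs are below) =====
def Claim_equal_graphFunction : Prop := ∀ (city_count : Int) (streets : List (Int × Int)) (start : Int) (target : Int), Dom_graphFunction city_count streets start target → Pre_graphFunction city_count streets start target → Spec_graphFunction city_count streets start target (graphFunction city_count streets start target)

-- ===== LEMMAS AND PROOFS =====


theorem pvCountSetLe (v : List Bool) (i : Nat) :
    (v.set i true).count false ≤ v.count false := by
  induction v generalizing i with
  | nil => simp
  | cons a t ih =>
    cases i with
    | zero => cases a <;> simp
    | succ j => simp [List.count_cons]; have := ih j; omega

-- Step (equation) lemmas for the two machines, in the normal form the proofs use.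
theorem runB_nil (adj : List (List Int)) (t : Int) (v : List Bool) :
    runB adj t [] v = -1 := by
  rw [runB]

theorem runB_pop (adj : List (List Int)) (t d : Int) (st : List (Int × List Int)) (v : List Bool) :
    runB adj t ((d, []) :: st) v = runB adj t st v := by
  rw [runB]

theorem runB_skip (adj : List (List Int)) (t d n : Int) (rest : List Int)
    (st : List (Int × List Int)) (v : List Bool)
    (h : v.getD (pidx n v.length) true = true) :
    runB adj t ((d, n :: rest) :: st) v = runB adj t ((d, rest) :: st) v := by
  rw [runB]
  rw [List.getD_eq_getElem?_getD] at h
  simp [h]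

theorem runB_push (adj : List (List Int)) (t d n : Int) (rest : List Int)
    (st : List (Int × List Int)) (v : List Bool)
    (h : v.getD (pidx n v.length) true = false) :
    runB adj t ((d, n :: rest) :: st) v =
      (if n == t then d + 1
       else runB adj t ((d + 1, adj.getD (pidx n adj.length) []) :: (d, rest) :: st)
              (v.set (pidx n v.length) true)) := by
  rw [runB]
  rw [List.getD_eq_getElem?_getD] at h
  simp [h]

theorem loopA_skip (adj : List (List Int)) (t : Int) (f : Nat) (n : Int) (ns : List Int)
    (d : Int) (v : List Bool) (h : v.getD (pidx n v.length) true = true) :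
    loopA adj t f (n :: ns) d v = loopA adj t f ns d v := by
  rw [loopA]
  rw [List.getD_eq_getElem?_getD] at h
  simp [h]

theorem loopA_go (adj : List (List Int)) (t : Int) (f : Nat) (n : Int) (ns : List Int)
    (d : Int) (v : List Bool) (h : v.getD (pidx n v.length) true = false) :
    loopA adj t f (n :: ns) d v =
      (match dfsA adj t f n (d + 1) v with
       | (r, v') => if r ≠ -1 then (r, v') else loopA adj t f ns d v') := by
  rw [loopA]
  rw [List.getD_eq_getElem?_getD] at h
  simp [h]

theorem dfsA_succ (adj : List (List Int)) (t : Int) (g : Nat) (c d : Int) (v : List Bool) :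
    dfsA adj t (g + 1) c d v =
      (if c == t then (d, v.set (pidx c v.length) true)
       else loopA adj t g (adj.getD (pidx c adj.length) []) d (v.set (pidx c v.length) true)) := by
  rw [dfsA]

-- The results of A's dfs/loop only add marks: the number of unvisited cities never grows.
theorem pvMono (adj : List (List Int)) (target : Int) : ∀ f : Nat,
    (∀ (c d : Int) (v : List Bool),
      ((dfsA adj target f c d v).2).count false ≤ v.count false) ∧
    (∀ (ns : List Int) (d : Int) (v : List Bool),
      ((loopA adj target f ns d v).2).count false ≤ v.count false) := by
  intro f
  induction f using Nat.strong_induction_on with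
  | _ f ihf =>
    have hd : ∀ (c d : Int) (v : List Bool),
        ((dfsA adj target f c d v).2).count false ≤ v.count false := by
      intro c d v
      cases f with
      | zero => simp [dfsA]
      | succ g =>
        rw [dfsA_succ]
        split
        · exact pvCountSetLe _ _
        · exact le_trans ((ihf g (Nat.lt_succ_self g)).2 _ _ _) (pvCountSetLe _ _)
    refine ⟨hd, ?_⟩
    intro ns d v
    induction ns generalizing v with
    | nil => simp [loopA]
    | cons n rest ihns =>
      by_cases hvis : v.getD (pidx n v.length) true = true
      · rw [loopA_skip _ _ _ _ _ _ _ hvis]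
        exact ihns v
      · have hvis' : v.getD (pidx n v.length) true = false := by simpa using hvis
        rw [loopA_go _ _ _ _ _ _ _ hvis']
        rcases hdv : dfsA adj target f n (d + 1) v with ⟨r, v2⟩
        have hm : v2.count false ≤ v.count false := by
          have := hd n (d + 1) v; rw [hdv] at this; exact this
        by_cases hr : r = -1
        · simp only [hr, ne_eq, not_true_eq_false, if_false]
          exact le_trans (ihns v2) hm
        · simp [hr, hm]

-- Simulation: B's stack machine run on a frame (d, ns) over stack st computes exactly
-- A's loop over ns (with sufficient fuel), then continues with the rest of the stack.
theorem pvSim (adj : List (List Int)) (target : Int) : ∀ f : Nat,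
    ∀ (ns : List Int) (d : Int) (v : List Bool) (st : List (Int × List Int)),
      v.count false + 1 ≤ f → 0 ≤ d →
      runB adj target ((d, ns) :: st) v =
        (match loopA adj target f ns d v with
         | (r, v2) => if r ≠ -1 then r else runB adj target st v2) := by
  intro f
  induction f using Nat.strong_induction_on with
  | _ f ihf =>
    intro ns
    induction ns with
    | nil =>
      intro d v st hf hd0
      cases f with
      | zero => omega
      | succ g => simp [runB_pop, loopA]
    | cons n rest ihns =>
      intro d v st hf hd0
      by_cases hvis : v.getD (pidx n v.length) true = true
      · rw [runB_skip _ _ _ _ _ _ _ hvis, loopA_skip _ _ _ _ _ _ _ hvis]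
        exact ihns d v st hf hd0
      · have hvis' : v.getD (pidx n v.length) true = false := by simpa using hvis
        cases f with
        | zero => omega
        | succ g =>
          rw [runB_push _ _ _ _ _ _ _ hvis', loopA_go _ _ _ _ _ _ _ hvis', dfsA_succ]
          have hcnt : (v.set (pidx n v.length) true).count false + 1 = v.count false :=
            pvCountSetTrue v _ hvis'
          by_cases htg : (n == target) = true
          · have hne : d + 1 ≠ -1 := by omega
            simp [htg, hne]
          · have htg' : (n == target) = false := by simpa using htg
            simp only [htg', if_false, Bool.false_eq_true]
            rw [ihf g (Nat.lt_succ_self g) _ (d + 1) _ ((d, rest) :: st) (by omega) (by omega)]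
            rcases hlp : loopA adj target g (adj.getD (pidx n adj.length) []) (d + 1)
                (v.set (pidx n v.length) true) with ⟨r2, v2⟩
            by_cases hr2 : r2 = -1
            · simp only [hr2, ne_eq, not_true_eq_false, if_false]
              have hm2 : v2.count false ≤ (v.set (pidx n v.length) true).count false := by
                have := (pvMono adj target g).2 (adj.getD (pidx n adj.length) []) (d + 1)
                  (v.set (pidx n v.length) true)
                rw [hlp] at this; exact this
              exact ihns d v2 st (by omega) hd0
            · simp [hr2]

-- If the building loop finishes (no early -1), every street endpoint is ≤ city_count.
theorem pvBuildSome : ∀ (streets : List (Int × Int)) (cc : Int) (adj adj2 : List (List Int)),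
    buildAdj cc streets adj = some adj2 → ∀ s ∈ streets, s.1 ≤ cc ∧ s.2 ≤ cc := by
  intro streets
  induction streets with
  | nil => intro cc adj adj2 _ s hs; simp at hs
  | cons p rest ih =>
    intro cc adj adj2 hb s hs
    rcases p with ⟨x, y⟩
    simp only [buildAdj] at hb
    by_cases hxy : cc < x ∨ cc < y
    · rw [if_pos hxy] at hb; simp at hb
    · rw [if_neg hxy] at hb
      rcases List.mem_cons.mp hs with rfl | hs
      · constructor <;> simp <;> omega
      · exact ih cc _ adj2 hb s hs

-- ===== VERDICT (by name: the statement is the Claim_ definition above) =====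
theorem graphFunction_spec : Claim_equal_graphFunction := by
  intro cc streets start target _ hpre
  rcases hpre with ⟨_hpref, hstart⟩
  rcases hb : buildAdj cc streets (List.replicate (cc + 1).toNat []) with _ | adj
  · simp [Spec_graphFunction, graphFunction, graphFunction_alt, hb]
  · have hall : ∀ s ∈ streets, s.1 ≤ cc ∧ s.2 ≤ cc := pvBuildSome _ _ _ _ hb
    have hsr : -(cc + 1) ≤ start ∧ start ≤ cc := hstart hall
    have hcc : 0 ≤ cc := by omega
    have hNcc : ((cc + 1).toNat : Int) = cc + 1 := by omega
    have hidx : pidx start (cc + 1).toNat < (cc + 1).toNat := by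
      unfold pidx; split <;> omega
    have hget : (List.replicate (cc + 1).toNat (false : Bool)).getD
        (pidx start (cc + 1).toNat) true = false := by
      rw [List.getD_eq_getElem?_getD, List.getElem?_replicate]
      simp [hidx]
    have hv1 : ((List.replicate (cc + 1).toNat (false : Bool)).set
        (pidx start (cc + 1).toNat) true).count false + 1 = (cc + 1).toNat := by
      have := pvCountSetTrue _ _ hget
      simpa using this
    simp only [Spec_graphFunction, graphFunction, graphFunction_alt, hb, List.length_replicate]
    rw [dfsA_succ]
    by_cases hstg : (start == target) = true
    · simp [hstg]
    · have hstg' : (start == target) = false := by simpa using hstg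
      simp only [hstg', if_false, Bool.false_eq_true]
      rw [pvSim adj target (cc + 1).toNat _ 1 _ [] (by omega) (by omega)]
      rcases hlp : loopA adj target (cc + 1).toNat
          (adj[pidx start adj.length]?.getD []) 1
          ((List.replicate (cc + 1).toNat false).set (pidx start (cc + 1).toNat) true)
          with ⟨r, v2⟩
      by_cases hr : r = -1
      · simp [hlp, hr, runB_nil]
      · simp [hlp, hr]
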